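-- pv_equiv track=rewrite | github.com/sbeckstrand/aoc-2023 | day07/main.py | get_hands_by_priority
-- ===== SOURCE A (Python) =====
-- def hand_sort(elem, joker=False):
--     card_face_vals = {
--         'A': 14,
--         'K': 13,
--         'Q': 12,
--         'J': 11,
--         'T': 10,
--         '9': 9,
--         '8': 8,
--         '7': 7,
--         '6': 6,
--         '5': 5,
--         '4': 4,
--         '3': 3,
--         '2': 2
--     }
--
--     if joker:
--         card_face_vals['J'] = 1
--
--     return [card_face_vals[char] for char in elem]
--
-- def get_hands_by_priority(hands_by_type, joker=False):
--     hands_by_priority = []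
--     for type in hands_by_type:
--         if len(hands_by_type[type]) == 1:
--             hands_by_priority.append(hands_by_type[type][0])
--         elif len(hands_by_type[type]) > 1:
--             sorted_hands = sorted(hands_by_type[type], key=lambda hand: hand_sort(hand, joker))
--             for hand in sorted_hands:
--                 hands_by_priority.append(hand)
--
--     return hands_by_priority
-- ===== SOURCE B (Python) =====
-- def get_hands_by_priority(hands_by_type, joker=False):
--     order = "J23456789TQKA" if joker else "23456789TJQKA"
--     flat = [(i, hand) for i, hands in enumerate(hands_by_type.values())
--             for hand in hands]
--     flat.sort(key=lambda p: (p[0], [order.find(c) for c in p[1]]))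
--     return [hand for _, hand in flat]
-- ===== Notes on version B (the rewrite author's own statement) =====
-- stated objective: alternative
-- what changed: Instead of looping over the groups and sorting each one separately (with a special case for singleton groups), B flattens all groups into one list of (group_index, hand) pairs, does a single stable sort keyed by (group_index, card-value list) using a rank string with str.find, and projects out the hands; empty and singleton groups need no special-casing.
import Mathlib
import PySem

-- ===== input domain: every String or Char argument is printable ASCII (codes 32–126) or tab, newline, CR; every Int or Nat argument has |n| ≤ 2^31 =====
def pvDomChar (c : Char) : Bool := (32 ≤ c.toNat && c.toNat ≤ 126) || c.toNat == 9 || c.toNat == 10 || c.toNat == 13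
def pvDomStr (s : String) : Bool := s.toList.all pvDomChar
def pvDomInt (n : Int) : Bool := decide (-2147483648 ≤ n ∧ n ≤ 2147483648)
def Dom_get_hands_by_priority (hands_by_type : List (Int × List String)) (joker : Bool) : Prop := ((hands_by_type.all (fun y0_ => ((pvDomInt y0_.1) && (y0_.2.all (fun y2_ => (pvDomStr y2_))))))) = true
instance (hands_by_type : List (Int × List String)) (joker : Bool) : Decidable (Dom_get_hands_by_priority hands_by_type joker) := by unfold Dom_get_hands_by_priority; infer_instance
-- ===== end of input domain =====

-- B replaces A's per-group sorts (with a singleton special case) by one flat stable sort of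
-- (group_index, hand) pairs keyed by (group_index, rank-string positions); equivalence of the
-- return values is proved on Pre_ (A raises KeyError outside it).

-- ===== PORT A =====
def hand_sort (elem : String) (joker : Bool) : List Int :=
  let card_face_vals : PySem.Dict Char Int :=
    PySem.Dict.ofList [('A',14),('K',13),('Q',12),('J',11),('T',10),('9',9),('8',8),('7',7),('6',6),('5',5),('4',4),('3',3),('2',2)]
  let card_face_vals := if joker then card_face_vals.insert 'J' 1 else card_face_vals
  -- card_face_vals[char]: Python raises KeyError on a char outside the dict; Pre_ excludes every
  -- input on which this lookup is reached with such a char, so the default 0 is never returned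
  elem.toList.map (fun c => card_face_vals.getD c 0)

def get_hands_by_priority (hands_by_type : List (Int × List String)) (joker : Bool) : List String :=
  let d := PySem.Dict.ofList hands_by_type
  d.items.foldl (fun hands_by_priority p =>
    let hands := d.getD p.1 []            -- hands_by_type[type]; key comes from the iteration, so never raises
    if hands.length == 1 then
      hands_by_priority ++ [PySem.List.pyGetD hands 0 ""]   -- hands[0]; in range because length == 1
    else if 1 < hands.length then
      let sorted_hands := PySem.List.sorted hands (fun hand => hand_sort hand joker) false
      sorted_hands.foldl (fun acc hand => acc ++ [hand]) hands_by_priority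
    else hands_by_priority) []

-- ===== PORT B =====
def get_hands_by_priority_alt (hands_by_type : List (Int × List String)) (joker : Bool) : List String :=
  let order : String := if joker then "J23456789TQKA" else "23456789TJQKA"
  let flat := (PySem.List.enumerate (PySem.Dict.ofList hands_by_type).values 0).flatMap
      (fun p => p.2.map (fun hand => (p.1, hand)))
  let flat := PySem.List.sorted2 flat (fun p => p.1)
      (fun p => p.2.toList.map (fun c => PySem.Str.find order (String.ofList [c]))) false
  flat.map (fun p => p.2)

-- ===== PRECONDITION & SPEC =====
def CARD_CHARS : List Char := ['A','K','Q','J','T','9','8','7','6','5','4','3','2']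

-- Pre_ excludes exactly the inputs on which A raises KeyError: some group of the dict with at
-- least two hands (only those groups are sorted by A) contains a character that is not a card face.
def Pre_get_hands_by_priority (hands_by_type : List (Int × List String)) (joker : Bool) : Prop :=
  ((PySem.Dict.ofList hands_by_type).items.all (fun p =>
    decide (p.2.length < 2) ||
      p.2.all (fun h => h.toList.all (fun c => decide (c ∈ CARD_CHARS))))) = true
instance (hands_by_type : List (Int × List String)) (joker : Bool) : Decidable (Pre_get_hands_by_priority hands_by_type joker) := by unfold Pre_get_hands_by_priority; infer_instance

def pvWitness_get_hands_by_priority : (List (Int × List String)) × Bool :=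
  ([(1, ["KK234", "22345"]), (2, ["T55J5"]), (3, [])], false)

def Spec_get_hands_by_priority (hands_by_type : List (Int × List String)) (joker : Bool) (out : List String) : Prop := out = get_hands_by_priority_alt hands_by_type joker
instance (hands_by_type : List (Int × List String)) (joker : Bool) (out : List String) : Decidable (Spec_get_hands_by_priority hands_by_type joker out) := by unfold Spec_get_hands_by_priority; infer_instance

-- ===== CLAIM (what is proved, stated in full; the proofs are below) =====
def Claim_equal_get_hands_by_priority : Prop := ∀ (hands_by_type : List (Int × List String)) (joker : Bool), Dom_get_hands_by_priority hands_by_type joker → Pre_get_hands_by_priority hands_by_type joker → Spec_get_hands_by_priority hands_by_type joker (get_hands_by_priority hands_by_type joker)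

-- ===== LEMMAS AND PROOFS =====

-- A's per-card value (the body of hand_sort's comprehension) and B's per-card rank
def pvValA (joker : Bool) (c : Char) : Int :=
  ((if joker
    then (PySem.Dict.ofList [('A',(14:Int)),('K',13),('Q',12),('J',11),('T',10),('9',9),('8',8),('7',7),('6',6),('5',5),('4',4),('3',3),('2',2)]).insert 'J' 1
    else PySem.Dict.ofList [('A',(14:Int)),('K',13),('Q',12),('J',11),('T',10),('9',9),('8',8),('7',7),('6',6),('5',5),('4',4),('3',3),('2',2)])).getD c 0

def pvValB (joker : Bool) (c : Char) : Int :=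
  PySem.Str.find (if joker then "J23456789TQKA" else "23456789TJQKA") (String.ofList [c])

lemma hand_sort_eq (elem : String) (joker : Bool) :
    hand_sort elem joker = elem.toList.map (pvValA joker) := by
  cases joker <;> rfl

-- on card characters the two per-card values induce the same order and the same equalities
set_option maxRecDepth 100000 in
lemma pvVal_facts : ∀ joker : Bool, ∀ c ∈ CARD_CHARS, ∀ d ∈ CARD_CHARS,
    (pvValA joker c < pvValA joker d ↔ pvValB joker c < pvValB joker d) ∧
    (pvValA joker c = pvValA joker d ↔ pvValB joker c = pvValB joker d) := by
  have hb : ∀ joker : Bool, (CARD_CHARS.all (fun c => CARD_CHARS.all (fun d =>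
      (decide (pvValA joker c < pvValA joker d) == decide (pvValB joker c < pvValB joker d)) &&
      (decide (pvValA joker c = pvValA joker d) == decide (pvValB joker c = pvValB joker d))))) = true := by
    decide
  intro joker c hc d hd
  have h := hb joker
  simp only [List.all_eq_true] at h
  have h2 := h c hc d hd
  simp only [Bool.and_eq_true, beq_iff_eq, decide_eq_decide] at h2
  exact h2

-- generic insertion-sort lemmas -------------------------------------------------

lemma insertBy_congr_mem {α : Type} (f g : α → α → Bool) (x : α) (ys : List α)
    (h : ∀ y ∈ ys, f x y = g x y) :
    PySem.List.insertBy f x ys = PySem.List.insertBy g x ys := by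
  induction ys with
  | nil => rfl
  | cons y ys ih =>
    simp only [PySem.List.insertBy, h y (by simp)]
    split_ifs with hb
    · rfl
    · rw [ih (fun z hz => h z (by simp [hz]))]

lemma foldl_insertBy_congr {α : Type} (f g : α → α → Bool) (xs acc : List α)
    (h : ∀ a ∈ xs, ∀ b, (b ∈ acc ∨ b ∈ xs) → f a b = g a b) :
    xs.foldl (fun acc x => PySem.List.insertBy f x acc) acc
      = xs.foldl (fun acc x => PySem.List.insertBy g x acc) acc := by
  induction xs generalizing acc with
  | nil => rfl
  | cons x xs ih =>
    simp only [List.foldl_cons]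
    rw [insertBy_congr_mem f g x acc (fun y hy => h x (by simp) y (Or.inl hy))]
    exact ih _ (fun a ha b hb => by
      refine h a (by simp [ha]) b ?_
      rcases hb with hb | hb
      · rcases (PySem.List.mem_insertBy g x b acc).1 hb with rfl | hb
        · exact Or.inr (by simp)
        · exact Or.inl hb
      · exact Or.inr (by simp [hb]))

lemma insertBy_append_left {α : Type} (f : α → α → Bool) (x : α) (pre ys : List α)
    (h : ∀ a ∈ pre, f x a = false) :
    PySem.List.insertBy f x (pre ++ ys) = pre ++ PySem.List.insertBy f x ys := by
  induction pre with
  | nil => rfl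
  | cons a pre ih =>
    simp only [List.cons_append, PySem.List.insertBy, h a (by simp)]
    simp [ih (fun b hb => h b (by simp [hb]))]

lemma foldl_insertBy_append {α : Type} (f : α → α → Bool) (l2 pre c : List α)
    (h : ∀ y ∈ l2, ∀ a ∈ pre, f y a = false) :
    l2.foldl (fun acc y => PySem.List.insertBy f y acc) (pre ++ c)
      = pre ++ l2.foldl (fun acc y => PySem.List.insertBy f y acc) c := by
  induction l2 generalizing c with
  | nil => rfl
  | cons y l2 ih =>
    simp only [List.foldl_cons]
    rw [insertBy_append_left f y pre c (fun a ha => h y (by simp) a ha)]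
    exact ih _ (fun z hz a ha => h z (by simp [hz]) a ha)

lemma insertBy_map {α β : Type} (m : α → β) (f : α → α → Bool) (g : β → β → Bool)
    (hg : ∀ a b, g (m a) (m b) = f a b) (x : α) (ys : List α) :
    PySem.List.insertBy g (m x) (ys.map m) = (PySem.List.insertBy f x ys).map m := by
  induction ys with
  | nil => rfl
  | cons y ys ih =>
    simp only [List.map_cons, PySem.List.insertBy, hg x y]
    split_ifs <;> simp [ih]

lemma foldl_insertBy_map {α β : Type} (m : α → β) (f : α → α → Bool) (g : β → β → Bool)
    (hg : ∀ a b, g (m a) (m b) = f a b) (xs acc : List α) :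
    (xs.map m).foldl (fun acc y => PySem.List.insertBy g y acc) (acc.map m)
      = (xs.foldl (fun acc x => PySem.List.insertBy f x acc) acc).map m := by
  induction xs generalizing acc with
  | nil => rfl
  | cons x xs ih =>
    simp only [List.map_cons, List.foldl_cons]
    rw [insertBy_map m f g hg x acc]
    exact ih _

-- the comparison sorted2 uses on (group_index, hand) pairs
def pvBefore (key2 : String → List Int) (a b : Int × String) : Bool :=
  decide (a.1 < b.1) || !decide (b.1 < a.1) && decide (key2 a.2 < key2 b.2)

lemma sorted2_eq (xs : List (Int × String)) (key2 : String → List Int) :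
    PySem.List.sorted2 xs (fun p => p.1) (fun p => key2 p.2) false
      = xs.foldl (fun acc x => PySem.List.insertBy (pvBefore key2) x acc) [] := rfl

-- the two per-card value tables induce the same lexicographic order on card-only hands
lemma lex_map_iff (joker : Bool) : ∀ (xs ys : List Char),
    (∀ c ∈ xs, c ∈ CARD_CHARS) → (∀ c ∈ ys, c ∈ CARD_CHARS) →
    (xs.map (pvValA joker) < ys.map (pvValA joker) ↔ xs.map (pvValB joker) < ys.map (pvValB joker)) := by
  intro xs
  induction xs with
  | nil =>
    intro ys _ _
    cases ys with
    | nil => simp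
    | cons y ys => simp [List.nil_lt_cons]
  | cons x xs ih =>
    intro ys hx hy
    cases ys with
    | nil =>
      constructor <;> intro h <;> exact absurd h (List.not_lt_nil _)
    | cons y ys =>
      simp only [List.map_cons, List.cons_lt_cons_iff]
      have hcx : x ∈ CARD_CHARS := hx x (by simp)
      have hcy : y ∈ CARD_CHARS := hy y (by simp)
      have hfacts := pvVal_facts joker x hcx y hcy
      rw [hfacts.1, hfacts.2]
      constructor
      · rintro (h | ⟨he, ht⟩)
        · exact Or.inl h
        · exact Or.inr ⟨he, (ih ys (fun c hc => hx c (by simp [hc]))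
            (fun c hc => hy c (by simp [hc]))).1 ht⟩
      · rintro (h | ⟨he, ht⟩)
        · exact Or.inl h
        · exact Or.inr ⟨he, (ih ys (fun c hc => hx c (by simp [hc]))
            (fun c hc => hy c (by simp [hc]))).2 ht⟩

-- B-side: the one flat stable sort splits into the per-group sorts ----------------

lemma sorted2_flat_eq {key2 : String → List Int} :
    ∀ (gs : List (List String)) (s : Int),
    ((PySem.List.sorted2
        ((PySem.List.enumerate gs s).flatMap (fun p => p.2.map (fun h => (p.1, h))))
        (fun p => p.1) (fun p => key2 p.2) false).map (fun p => p.2))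
      = gs.flatMap (fun v => PySem.List.sorted v key2 false) := by
  intro gs
  induction gs with
  | nil => intro s; rfl
  | cons v gs ih =>
    intro s
    rw [PySem.List.enumerate_cons]
    simp only [List.flatMap_cons]
    rw [sorted2_eq, List.foldl_append]
    have hstepA :
        (v.map (fun h => ((s : Int), h))).foldl
          (fun acc x => PySem.List.insertBy (pvBefore key2) x acc) []
          = (PySem.List.sorted v key2 false).map (fun h => ((s : Int), h)) := by
      rw [PySem.List.sorted_eq_foldl_insertBy]
      have := foldl_insertBy_map (fun h : String => ((s : Int), h))
        (fun a b => decide (key2 a < key2 b)) (pvBefore key2)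
        (fun a b => by simp [pvBefore]) v []
      simpa using this
    rw [hstepA]
    have hrest : ∀ y ∈ (PySem.List.enumerate gs (s+1)).flatMap
        (fun p => p.2.map (fun h => (p.1, h))),
        ∀ a ∈ (PySem.List.sorted v key2 false).map (fun h => ((s : Int), h)),
        pvBefore key2 y a = false := by
      intro y hy a ha
      simp only [List.mem_flatMap, List.mem_map] at hy ha
      obtain ⟨q, hq, h', _, rfl⟩ := hy
      obtain ⟨h'', _, rfl⟩ := ha
      rw [PySem.List.mem_enumerate_iff] at hq
      obtain ⟨k, hk, rfl⟩ := hq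
      simp only [pvBefore]
      have h1 : ¬ ((s + 1 + (k : Int)) < s) := by omega
      have h2 : s < s + 1 + (k : Int) := by omega
      simp [h1, h2]
    have := foldl_insertBy_append (pvBefore key2)
      ((PySem.List.enumerate gs (s+1)).flatMap (fun p => p.2.map (fun h => (p.1, h))))
      ((PySem.List.sorted v key2 false).map (fun h => ((s : Int), h))) [] hrest
    simp only [List.append_nil] at this
    rw [this, List.map_append, List.map_map]
    have hmm : ((PySem.List.sorted v key2 false).map
        ((fun p : Int × String => p.2) ∘ fun h => ((s : Int), h)))
        = PySem.List.sorted v key2 false := by simp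
    rw [hmm]
    have hih := ih (s+1)
    rw [sorted2_eq] at hih
    rw [hih]

-- A-side: the foldl over the dict items is the flatMap of per-group contributions --

def pvContrib (joker : Bool) (v : List String) : List String :=
  if v.length == 1 then [PySem.List.pyGetD v 0 ""]
  else if 1 < v.length then PySem.List.sorted v (fun hand => hand_sort hand joker) false
  else []

lemma A_foldl_eq (joker : Bool) (d : PySem.Dict Int (List String))
    (hnd : d.keys.Nodup) :
    ∀ (l : List (Int × List String)) (acc : List String), (∀ p ∈ l, p ∈ d.items) →
    l.foldl (fun hands_by_priority p =>
      let hands := d.getD p.1 []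
      if hands.length == 1 then
        hands_by_priority ++ [PySem.List.pyGetD hands 0 ""]
      else if 1 < hands.length then
        let sorted_hands := PySem.List.sorted hands (fun hand => hand_sort hand joker) false
        sorted_hands.foldl (fun acc hand => acc ++ [hand]) hands_by_priority
      else hands_by_priority) acc
      = acc ++ l.flatMap (fun p => pvContrib joker p.2) := by
  intro l
  induction l with
  | nil => intro acc _; simp
  | cons p l ih =>
    intro acc hmem
    have hget : d.get? p.1 = some p.2 :=
      (PySem.Dict.get?_eq_some_iff_mem_items d p.1 p.2 hnd).2 (hmem p (by simp))
    simp only [List.foldl_cons, List.flatMap_cons]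
    have hD : d.getD p.1 [] = p.2 := by simp [PySem.Dict.getD, hget]
    have hstep : (if ((d.getD p.1 []).length == 1) = true then
          acc ++ [PySem.List.pyGetD (d.getD p.1 []) 0 ""]
        else if 1 < (d.getD p.1 []).length then
          List.foldl (fun acc hand => acc ++ [hand]) acc
            (PySem.List.sorted (d.getD p.1 []) fun hand => hand_sort hand joker)
        else acc) = acc ++ pvContrib joker p.2 := by
      simp only [hD, pvContrib]
      split_ifs with h1 h2
      · rfl
      · rw [PySem.List.foldl_append_singleton]
      · simp
    rw [hstep, ih _ (fun q hq => hmem q (by simp [hq])), List.append_assoc]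

-- per-group: A's contribution is exactly B's per-group sort on valid groups --------

lemma contrib_eq_sorted (joker : Bool) (v : List String)
    (hv : 2 ≤ v.length → ∀ h ∈ v, ∀ c ∈ h.toList, c ∈ CARD_CHARS) :
    pvContrib joker v
      = PySem.List.sorted v (fun h => h.toList.map (pvValB joker)) false := by
  match v with
  | [] => rfl
  | [h] => rfl
  | h1 :: h2 :: t =>
    have hlen : 2 ≤ (h1 :: h2 :: t).length := by simp
    have hval := hv hlen
    simp only [pvContrib]
    have hne : ¬ ((h1 :: h2 :: t).length == 1) = true := by simp
    have hgt : 1 < (h1 :: h2 :: t).length := by simp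
    simp only [hne, hgt, if_true]
    rw [PySem.List.sorted_eq_foldl_insertBy, PySem.List.sorted_eq_foldl_insertBy]
    apply foldl_insertBy_congr
    intro a ha b hb
    have hbv : b ∈ h1 :: h2 :: t := by
      rcases hb with hb | hb
      · exact absurd hb (List.not_mem_nil)
      · exact hb
    rw [hand_sort_eq, hand_sort_eq]
    rw [decide_eq_decide]
    exact lex_map_iff joker a.toList b.toList (hval a ha) (hval b hbv)

-- ===== VERDICT (by name: the statement is the Claim_ definition above) =====
theorem get_hands_by_priority_spec : Claim_equal_get_hands_by_priority := by
  intro hbt joker _ hpre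
  unfold Spec_get_hands_by_priority
  unfold get_hands_by_priority get_hands_by_priority_alt
  have hA := A_foldl_eq joker (PySem.Dict.ofList hbt)
    (PySem.Dict.nodup_keys_ofList hbt) (PySem.Dict.ofList hbt).items []
    (fun p hp => hp)
  simp only [List.nil_append] at hA
  rw [hA]
  have hB := sorted2_flat_eq (key2 := fun h => h.toList.map (pvValB joker))
    ((PySem.Dict.ofList hbt).values) 0
  show List.flatMap (fun p => pvContrib joker p.2) (PySem.Dict.ofList hbt).items
      = List.map (fun p => p.2) (PySem.List.sorted2
          (List.flatMap (fun p => List.map (fun h => (p.1, h)) p.2)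
            (PySem.List.enumerate (PySem.Dict.ofList hbt).values 0))
          (fun p => p.1) (fun p => List.map (pvValB joker) p.2.toList) false)
  rw [hB]
  have hvals : (PySem.Dict.ofList hbt).values = (PySem.Dict.ofList hbt).items.map (·.2) := rfl
  rw [hvals, List.flatMap_map]
  apply List.flatMap_congr
  intro p hp
  unfold Pre_get_hands_by_priority at hpre
  simp only [List.all_eq_true, Bool.or_eq_true, decide_eq_true_eq] at hpre
  exact contrib_eq_sorted joker p.2 (fun hlen => (hpre p hp).resolve_left (by omega))
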